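-- pv_equiv track=rewrite | github.com/pabloluqueromero/PROJECTS | MetaHeuristics/utils.py | getWallsBeneathPositions
-- ===== SOURCE A (Python) =====
-- def getWallsBeneathPositions(walls,size):
-- 	numberWalls=dict()
-- 	for wall in walls:
-- 		column = wall % size
-- 		row = wall // size
-- 		for j in range(0,row):
-- 			position = j*size+column
-- 			if position not in walls:
-- 				numberWalls[position]=1
--
-- 	for pos in numberWalls:
-- 		column = pos%size
-- 		if column == 0 and ((pos + 1) in walls or (pos + 1)  in numberWalls):
-- 			numberWalls[pos]+=1
-- 		elif column == (size-1) and ((pos - 1) in walls or (pos - 1)  in numberWalls):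
-- 			numberWalls[pos]+=1
-- 		elif ((pos - 1) in walls or (pos - 1)  in numberWalls) and ((pos + 1) in walls or (pos +1)  in numberWalls):
-- 			numberWalls[pos]+=1
--
-- 	return numberWalls
-- ===== SOURCE B (Python) =====
-- def getWallsBeneathPositions(walls, size):
--     wallSet = set(walls)
--     colmax = {}
--     shadows = {}
--     for wall in walls:
--         column = wall % size
--         row = wall // size
--         m = colmax.get(column, 0)
--         if m < row:
--             for j in range(m, row):
--                 position = j * size + column
--                 if position not in wallSet:
--                     shadows[position] = 1
--             colmax[column] = row
--     occupied = wallSet | shadows.keys()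
--     for pos in shadows:
--         column = pos % size
--         left = (pos - 1) in occupied
--         right = (pos + 1) in occupied
--         if (column == 0 and right) or (column == size - 1 and left) or (left and right):
--             shadows[pos] = 2
--     return shadows
-- ===== Notes on version B (the rewrite author's own statement) =====
-- stated objective: faster
-- what changed: B keeps a per-column running-maximum dict so each column's shadow segment is extended incrementally instead of rescanning every row from 0 per wall, and replaces the O(n) 'in walls'/'in numberWalls' list scans by set lookups (wall set and a precomputed occupied set).
-- outside the precondition, e.g. on getWallsBeneathPositions([], 0): A returns {}, B returns {}; on getWallsBeneathPositions([3], 0): A raises ZeroDivisionError, B raises ZeroDivisionError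
import Mathlib
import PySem

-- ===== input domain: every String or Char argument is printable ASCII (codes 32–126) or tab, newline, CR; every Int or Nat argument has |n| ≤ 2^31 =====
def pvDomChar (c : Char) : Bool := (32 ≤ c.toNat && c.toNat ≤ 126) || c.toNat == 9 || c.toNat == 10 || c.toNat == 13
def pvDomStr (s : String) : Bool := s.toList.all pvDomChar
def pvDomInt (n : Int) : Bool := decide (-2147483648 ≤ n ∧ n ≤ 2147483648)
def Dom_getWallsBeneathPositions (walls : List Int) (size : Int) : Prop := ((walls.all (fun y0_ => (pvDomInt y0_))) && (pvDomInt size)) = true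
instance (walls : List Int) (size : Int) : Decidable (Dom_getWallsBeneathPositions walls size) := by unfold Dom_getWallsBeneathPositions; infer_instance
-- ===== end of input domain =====

-- B replaces A's per-wall rescan from row 0 (with O(n) list membership) by a per-column running
-- maximum that extends each column's shadow segment once, plus set-based occupancy lookups: faster
-- by mechanism, same return value.

-- ===== PORT A =====
-- one iteration of A's inner 'for j in range(0, row)' loop
def aInner (walls : List Int) (size column : Int) (d : PySem.Dict Int Int) (j : Int) : PySem.Dict Int Int :=
  let position := j * size + column
  if walls.contains position then d else d.insert position 1

-- one iteration of A's outer 'for wall in walls' loop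
def aWallStep (walls : List Int) (size : Int) (d : PySem.Dict Int Int) (wall : Int) : PySem.Dict Int Int :=
  let column := PySem.Int.mod wall size
  let row := PySem.Int.floordiv wall size
  (PySem.List.pyRange 0 row 1).foldl (aInner walls size column) d

-- one iteration of A's second 'for pos in numberWalls' loop (the if/elif/elif cascade;
-- 'numberWalls[pos] += 1' is ported as insert of getD+1 — pos is always a key here)
def aBump (walls : List Int) (size : Int) (d : PySem.Dict Int Int) (pos : Int) : PySem.Dict Int Int :=
  let column := PySem.Int.mod pos size
  if column == 0 && (walls.contains (pos + 1) || d.contains (pos + 1)) then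
    d.insert pos (d.getD pos 0 + 1)
  else if column == size - 1 && (walls.contains (pos - 1) || d.contains (pos - 1)) then
    d.insert pos (d.getD pos 0 + 1)
  else if (walls.contains (pos - 1) || d.contains (pos - 1)) && (walls.contains (pos + 1) || d.contains (pos + 1)) then
    d.insert pos (d.getD pos 0 + 1)
  else d

def getWallsBeneathPositions (walls : List Int) (size : Int) : List (Int × Int) :=
  let numberWalls := walls.foldl (aWallStep walls size) PySem.Dict.empty
  (numberWalls.keys.foldl (aBump walls size) numberWalls).items

-- ===== PORT B =====
-- one iteration of B's inner 'for j in range(m, row)' loop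
def bInner (wallSet : PySem.Set Int) (size column : Int) (sh : PySem.Dict Int Int) (j : Int) : PySem.Dict Int Int :=
  let position := j * size + column
  if PySem.Set.contains wallSet position then sh else sh.insert position 1

-- one iteration of B's 'for wall in walls' loop over the state (colmax, shadows)
def bWallStep (wallSet : PySem.Set Int) (size : Int)
    (st : PySem.Dict Int Int × PySem.Dict Int Int) (wall : Int) :
    PySem.Dict Int Int × PySem.Dict Int Int :=
  let column := PySem.Int.mod wall size
  let row := PySem.Int.floordiv wall size
  let m := st.1.getD column 0
  if m < row then
    (st.1.insert column row, (PySem.List.pyRange m row 1).foldl (bInner wallSet size column) st.2)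
  else st

-- one iteration of B's 'for pos in shadows' loop
def bBump (occupied : PySem.Set Int) (size : Int) (sh : PySem.Dict Int Int) (pos : Int) : PySem.Dict Int Int :=
  let column := PySem.Int.mod pos size
  let left := PySem.Set.contains occupied (pos - 1)
  let right := PySem.Set.contains occupied (pos + 1)
  if (column == 0 && right) || (column == size - 1 && left) || (left && right) then
    sh.insert pos 2
  else sh

def getWallsBeneathPositions_alt (walls : List Int) (size : Int) : List (Int × Int) :=
  let wallSet := PySem.Set.ofList walls
  let shadows := (walls.foldl (bWallStep wallSet size) (PySem.Dict.empty, PySem.Dict.empty)).2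
  let occupied := PySem.Set.union wallSet (PySem.Dict.keys shadows)
  (shadows.keys.foldl (bBump occupied size) shadows).items

-- ===== PRECONDITION & SPEC =====
-- Pre_ excludes size = 0: A raises ZeroDivisionError at 'wall % size' whenever walls is nonempty
-- (with walls = [] and size = 0 both programs return the empty dict; that corner is excluded with
-- the rest of size = 0 for uniformity).
def Pre_getWallsBeneathPositions (walls : List Int) (size : Int) : Prop := size ≠ 0
instance (walls : List Int) (size : Int) : Decidable (Pre_getWallsBeneathPositions walls size) := by unfold Pre_getWallsBeneathPositions; infer_instance
def pvWitness_getWallsBeneathPositions : List Int × Int := ([7, 5, 3], 3)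

def Spec_getWallsBeneathPositions (walls : List Int) (size : Int) (out : List (Int × Int)) : Prop := out = getWallsBeneathPositions_alt walls size
instance (walls : List Int) (size : Int) (out : List (Int × Int)) : Decidable (Spec_getWallsBeneathPositions walls size out) := by unfold Spec_getWallsBeneathPositions; infer_instance

-- ===== CLAIM (what is proved, stated in full; the proofs are below) =====
def Claim_equal_getWallsBeneathPositions : Prop := ∀ (walls : List Int) (size : Int), Dom_getWallsBeneathPositions walls size → Pre_getWallsBeneathPositions walls size → Spec_getWallsBeneathPositions walls size (getWallsBeneathPositions walls size)

-- ===== LEMMAS AND PROOFS =====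

-- the loop invariant tying A's single dict to B's (colmax, shadows) state
def pvInv (walls : List Int) (size : Int) (cm d : PySem.Dict Int Int) : Prop :=
  (PySem.Dict.keys cm).Nodup ∧ (PySem.Dict.keys d).Nodup ∧
  (∀ c r, (c, r) ∈ cm.items → PySem.Int.mod c size = c ∧ 0 < r) ∧
  (∀ p, p ∈ PySem.Dict.keys d ↔
    (p ∉ walls ∧ 0 ≤ PySem.Int.floordiv p size ∧
      PySem.Int.floordiv p size < PySem.Dict.getD cm (PySem.Int.mod p size) 0)) ∧
  (∀ p v, (p, v) ∈ d.items → v = 1)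

-- uniqueness of Python divmod given the divisor-sign bounds
lemma pv_divmod_unique (a b q r : Int) (hb : b ≠ 0) (h : a = q * b + r)
    (hpos : 0 < b → 0 ≤ r ∧ r < b) (hneg : b < 0 → b < r ∧ r ≤ 0) :
    PySem.Int.floordiv a b = q ∧ PySem.Int.mod a b = r := by
  have e := PySem.Int.floordiv_mul_add_mod a b
  set q' := PySem.Int.floordiv a b with hq'
  set r' := PySem.Int.mod a b with hr'
  have key : (q' - q) * b = r - r' := by ring_nf; nlinarith [e, h]
  rcases lt_trichotomy b 0 with hb1 | hb1 | hb1
  · have hbr : b < PySem.Int.mod a b ∧ PySem.Int.mod a b ≤ 0 := by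
      apply PySem.Int.mod_neg_bounds
      exact hb1
    have hc := hneg hb1
    rw [← hr'] at hbr
    have hq : q' = q := by nlinarith [key]
    exact ⟨hq, by nlinarith [key, hq]⟩
  · omega
  · have h1 : 0 ≤ PySem.Int.mod a b := by
      apply PySem.Int.mod_nonneg
      exact hb1
    have h2 : PySem.Int.mod a b < b := by
      apply PySem.Int.mod_lt
      exact hb1
    have hc := hpos hb1
    rw [← hr'] at h1 h2
    have hq : q' = q := by nlinarith [key]
    exact ⟨hq, by nlinarith [key, hq]⟩

lemma pv_mod_bounds (a b : Int) :
    (0 < b → 0 ≤ PySem.Int.mod a b ∧ PySem.Int.mod a b < b) ∧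
    (b < 0 → b < PySem.Int.mod a b ∧ PySem.Int.mod a b ≤ 0) := by
  constructor
  · intro h1
    constructor
    · apply PySem.Int.mod_nonneg
      exact h1
    · apply PySem.Int.mod_lt
      exact h1
  · intro h1
    apply PySem.Int.mod_neg_bounds
    exact h1

lemma pv_mod_idem (a b : Int) (hb : b ≠ 0) :
    PySem.Int.mod (PySem.Int.mod a b) b = PySem.Int.mod a b := by
  obtain ⟨h1, h2⟩ := pv_mod_bounds a b
  exact (pv_divmod_unique (PySem.Int.mod a b) b 0 (PySem.Int.mod a b) hb (by ring) h1 h2).2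

lemma pv_decomp (j c b : Int) (hb : b ≠ 0) (hc : PySem.Int.mod c b = c) :
    PySem.Int.floordiv (j * b + c) b = j ∧ PySem.Int.mod (j * b + c) b = c := by
  obtain ⟨h1, h2⟩ := pv_mod_bounds c b
  rw [hc] at h1 h2
  exact pv_divmod_unique (j * b + c) b j c hb (by ring) h1 h2

lemma pv_foldl_id_of_mem {α β : Type} (l : List β) (f : α → β → α) (d : α)
    (h : ∀ x ∈ l, f d x = d) : l.foldl f d = d := by
  induction l with
  | nil => rfl
  | cons x xs ih =>
    simp only [List.foldl_cons, h x (by simp)]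
    exact ih (fun y hy => h y (by simp [hy]))

lemma pv_insert_self_of_mem (d : PySem.Dict Int Int) (k v : Int)
    (hnd : (PySem.Dict.keys d).Nodup) (h : (k, v) ∈ d.items) : d.insert k v = d := by
  have hk : d.contains k = true := by
    rw [PySem.Dict.contains_iff_mem_keys]
    exact PySem.Dict.mem_keys_of_mem_items d h
  apply PySem.Dict.ext
  rw [PySem.Dict.items_insert_of_contains d v hk]
  have hv : d.get? k = some v := PySem.Dict.get?_of_mem_items d h hnd
  conv_rhs => rw [← List.map_id d.items]
  apply List.map_congr_left
  intro p hp
  by_cases hpk : p.1 = k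
  · have hv2 : d.get? p.1 = some p.2 := PySem.Dict.get?_of_mem_items d (by simpa using hp) hnd
    rw [hpk, hv] at hv2
    have hv3 : v = p.2 := Option.some_inj.mp hv2
    have hpeq : p = (k, v) := by
      have h1 : p = (p.1, p.2) := rfl
      rw [h1, hpk, ← hv3]
    rw [hpeq]
    simp
  · simp [hpk]

lemma pv_wallSet_contains (walls : List Int) (x : Int) :
    PySem.Set.contains (PySem.Set.ofList walls) x = walls.contains x := by
  by_cases h : x ∈ walls
  · have h1 : PySem.Set.contains (PySem.Set.ofList walls) x = true := by
      rw [PySem.Set.contains_iff, PySem.Set.mem_ofList]; exact h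
    have h2 : walls.contains x = true := by simpa using h
    rw [h1, h2]
  · have h1 : PySem.Set.contains (PySem.Set.ofList walls) x = false := by
      rw [Bool.eq_false_iff, Ne, PySem.Set.contains_iff, PySem.Set.mem_ofList]; exact h
    have h2 : walls.contains x = false := by simpa using h
    rw [h1, h2]

lemma pv_inner_keys (walls : List Int) (size column : Int) (l : List Int)
    (sh : PySem.Dict Int Int) (p : Int) :
    p ∈ (l.foldl (bInner (PySem.Set.ofList walls) size column) sh).keys ↔
      p ∈ sh.keys ∨ (p ∉ walls ∧ ∃ j ∈ l, p = j * size + column) := by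
  induction l generalizing sh with
  | nil => simp
  | cons x xs ih =>
    simp only [List.foldl_cons]
    rw [ih]
    unfold bInner
    dsimp only
    by_cases hw : (x * size + column) ∈ walls
    · have : PySem.Set.contains (PySem.Set.ofList walls) (x * size + column) = true := by
        rw [PySem.Set.contains_iff, PySem.Set.mem_ofList]; exact hw
      rw [if_pos this]
      constructor
      · rintro (h | h)
        · exact Or.inl h
        · exact Or.inr ⟨h.1, h.2.imp (fun j hj => ⟨List.mem_cons_of_mem _ hj.1, hj.2⟩)⟩
      · rintro (h | ⟨hnw, j, hj, rfl⟩)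
        · exact Or.inl h
        · rcases List.mem_cons.mp hj with rfl | hj
          · exact absurd hw hnw
          · exact Or.inr ⟨hnw, j, hj, rfl⟩
    · have : ¬ PySem.Set.contains (PySem.Set.ofList walls) (x * size + column) = true := by
        rw [PySem.Set.contains_iff, PySem.Set.mem_ofList]; exact hw
      rw [if_neg this]
      rw [PySem.Dict.mem_keys_insert]
      constructor
      · rintro ((rfl | h) | h)
        · exact Or.inr ⟨hw, x, by simp, rfl⟩
        · exact Or.inl h
        · exact Or.inr ⟨h.1, h.2.imp (fun j hj => ⟨List.mem_cons_of_mem _ hj.1, hj.2⟩)⟩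
      · rintro (h | ⟨hnw, j, hj, rfl⟩)
        · exact Or.inl (Or.inr h)
        · rcases List.mem_cons.mp hj with rfl | hj
          · exact Or.inl (Or.inl rfl)
          · exact Or.inr ⟨hnw, j, hj, rfl⟩

lemma pv_inner_preserve (walls : List Int) (size column : Int) (l : List Int)
    (sh : PySem.Dict Int Int)
    (h : (PySem.Dict.keys sh).Nodup ∧ ∀ p v, (p, v) ∈ sh.items → v = 1) :
    (PySem.Dict.keys (l.foldl (bInner (PySem.Set.ofList walls) size column) sh)).Nodup ∧
      ∀ p v, (p, v) ∈ (l.foldl (bInner (PySem.Set.ofList walls) size column) sh).items → v = 1 := by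
  induction l generalizing sh with
  | nil => exact h
  | cons x xs ih =>
    simp only [List.foldl_cons]
    apply ih
    unfold bInner
    dsimp only
    split
    · exact h
    · constructor
      · exact PySem.Dict.nodup_keys_insert _ _ _ h.1
      · intro p v hmem
        rcases (PySem.Dict.mem_items_insert _ _ _ _).mp hmem with heq | ⟨hold, _⟩
        · rw [Prod.mk.injEq] at heq
          exact heq.2
        · exact h.2 p v hold

lemma pv_aInner_eq_bInner (walls : List Int) (size column : Int)
    (d : PySem.Dict Int Int) (j : Int) :
    aInner walls size column d j = bInner (PySem.Set.ofList walls) size column d j := by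
  unfold aInner bInner
  dsimp only
  rw [pv_wallSet_contains]

lemma pv_getD_cm_nonneg (walls : List Int) (size : Int) (cm d : PySem.Dict Int Int)
    (hInv : pvInv walls size cm d) (c : Int) : 0 ≤ PySem.Dict.getD cm c 0 := by
  by_cases hc : cm.contains c = true
  · rw [PySem.Dict.contains_iff_mem_keys] at hc
    simp only [PySem.Dict.keys] at hc
    obtain ⟨p, hp, hfst⟩ := List.mem_map.mp hc
    have hmem : (c, p.2) ∈ cm.items := by rw [← hfst]; simpa using hp
    have hval := (hInv.2.2.1 c p.2 hmem).2
    have hgd := PySem.Dict.getD_of_mem_items cm hmem hInv.1 0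
    omega
  · rw [Bool.not_eq_true] at hc
    rw [PySem.Dict.getD_of_not_contains cm 0 hc]

lemma pv_step (walls : List Int) (size : Int) (hb : size ≠ 0)
    (cm d : PySem.Dict Int Int) (w : Int) (hInv : pvInv walls size cm d) :
    aWallStep walls size d w = (bWallStep (PySem.Set.ofList walls) size (cm, d) w).2 ∧
      pvInv walls size (bWallStep (PySem.Set.ofList walls) size (cm, d) w).1
        (bWallStep (PySem.Set.ofList walls) size (cm, d) w).2 := by
  obtain ⟨hcmN, hdN, hcmI, hmemI, hvalI⟩ := hInv
  simp only [aWallStep, bWallStep]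
  set column := PySem.Int.mod w size with hcol
  set row := PySem.Int.floordiv w size with hrow
  set m := PySem.Dict.getD cm column 0 with hm
  have hm0 : 0 ≤ m := pv_getD_cm_nonneg walls size cm d ⟨hcmN, hdN, hcmI, hmemI, hvalI⟩ column
  have hcc : PySem.Int.mod column size = column := pv_mod_idem w size hb
  have hid : ∀ j : Int, 0 ≤ j → j < m → bInner (PySem.Set.ofList walls) size column d j = d := by
    intro j hj0 hjm
    unfold bInner
    dsimp only
    by_cases hw : (j * size + column) ∈ walls
    · rw [if_pos (by rw [PySem.Set.contains_iff, PySem.Set.mem_ofList]; exact hw)]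
    · rw [if_neg (by rw [PySem.Set.contains_iff, PySem.Set.mem_ofList]; exact hw)]
      obtain ⟨hfd, hmd⟩ := pv_decomp j column size hb hcc
      have hkey : (j * size + column) ∈ d.keys := by
        rw [hmemI, hfd, hmd]
        exact ⟨hw, by omega, by omega⟩
      simp only [PySem.Dict.keys] at hkey
      obtain ⟨p, hp, hfst⟩ := List.mem_map.mp hkey
      have hmemp : (j * size + column, p.2) ∈ d.items := by rw [← hfst]; simpa using hp
      have hv1 : p.2 = 1 := hvalI _ _ hmemp
      rw [hv1] at hmemp
      exact pv_insert_self_of_mem d _ 1 hdN hmemp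
  by_cases hlt : m < row
  · rw [if_pos hlt]
    simp only []
    have hcongr : List.foldl (aInner walls size column) d (PySem.List.pyRange 0 row) =
        List.foldl (bInner (PySem.Set.ofList walls) size column) d (PySem.List.pyRange 0 row) :=
      PySem.List.foldl_congr_mem _ _ _ _ (fun acc x _ => pv_aInner_eq_bInner walls size column acc x)
    have hsplit := PySem.List.pyRange_one_append 0 m row hm0 (le_of_lt hlt)
    have hfirst : List.foldl (bInner (PySem.Set.ofList walls) size column) d (PySem.List.pyRange 0 m) = d := by
      apply pv_foldl_id_of_mem
      intro j hj
      rw [PySem.List.mem_pyRange_one] at hj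
      exact hid j hj.1 hj.2
    constructor
    · rw [hcongr, hsplit, List.foldl_append, hfirst]
    · have hpres := pv_inner_preserve walls size column (PySem.List.pyRange m row) d ⟨hdN, hvalI⟩
      refine ⟨PySem.Dict.nodup_keys_insert _ _ _ hcmN, hpres.1, ?_, ?_, hpres.2⟩
      · intro c r hmem
        rcases (PySem.Dict.mem_items_insert _ _ _ _).mp hmem with heq | ⟨hold, _⟩
        · rw [Prod.mk.injEq] at heq
          obtain ⟨rfl, rfl⟩ := heq
          exact ⟨hcc, by omega⟩
        · exact hcmI c r hold
      · intro p
        rw [pv_inner_keys, hmemI, PySem.Dict.getD_insert]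
        have hpd := PySem.Int.floordiv_mul_add_mod p size
        by_cases hpc : PySem.Int.mod p size = column
        · rw [if_pos hpc]
          constructor
          · rintro (⟨hnw, h1, h2⟩ | ⟨hnw, j, hj, rfl⟩)
            · rw [hpc] at h2
              exact ⟨hnw, h1, by omega⟩
            · rw [PySem.List.mem_pyRange_one] at hj
              obtain ⟨hfd, hmd⟩ := pv_decomp j column size hb hcc
              rw [hfd]
              exact ⟨hnw, by omega, by omega⟩
          · rintro ⟨hnw, h1, h2⟩
            by_cases hsm : PySem.Int.floordiv p size < m
            · refine Or.inl ⟨hnw, h1, ?_⟩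
              rw [hpc]
              omega
            · refine Or.inr ⟨hnw, PySem.Int.floordiv p size, ?_, ?_⟩
              · rw [PySem.List.mem_pyRange_one]
                omega
              · rw [← hpc]
                omega
        · rw [if_neg hpc]
          constructor
          · rintro (⟨hnw, h1, h2⟩ | ⟨hnw, j, hj, rfl⟩)
            · exact ⟨hnw, h1, h2⟩
            · obtain ⟨hfd, hmd⟩ := pv_decomp j column size hb hcc
              exact absurd hmd hpc
          · rintro ⟨hnw, h1, h2⟩
            exact Or.inl ⟨hnw, h1, h2⟩
  · rw [if_neg hlt]
    refine ⟨?_, hcmN, hdN, hcmI, hmemI, hvalI⟩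
    rw [PySem.List.foldl_congr_mem _ _ _ _ (fun acc x _ => pv_aInner_eq_bInner walls size column acc x)]
    apply pv_foldl_id_of_mem
    intro j hj
    rw [PySem.List.mem_pyRange_one] at hj
    exact hid j hj.1 (by omega)

lemma pv_firstPass (walls : List Int) (size : Int) (hb : size ≠ 0) (ws : List Int) :
    ∀ (cm d : PySem.Dict Int Int), pvInv walls size cm d →
      ws.foldl (aWallStep walls size) d =
          (ws.foldl (bWallStep (PySem.Set.ofList walls) size) (cm, d)).2 ∧
        pvInv walls size (ws.foldl (bWallStep (PySem.Set.ofList walls) size) (cm, d)).1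
          (ws.foldl (bWallStep (PySem.Set.ofList walls) size) (cm, d)).2 := by
  induction ws with
  | nil => intro cm d h; exact ⟨rfl, h⟩
  | cons w ws ih =>
    intro cm d h
    obtain ⟨h1, h2⟩ := pv_step walls size hb cm d w h
    have := ih (bWallStep (PySem.Set.ofList walls) size (cm, d) w).1
      (bWallStep (PySem.Set.ofList walls) size (cm, d) w).2 h2
    simpa [List.foldl_cons, h1] using this

lemma pv_cascade {α : Type} (c1 c2 c3 : Bool) (t e : α) :
    (if c1 then t else if c2 then t else if c3 then t else e) =
      (if c1 || c2 || c3 then t else e) := by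
  cases c1 <;> cases c2 <;> cases c3 <;> simp

lemma pv_secondPass (walls : List Int) (size : Int) (K : List Int) (ks : List Int) :
    ∀ (d : PySem.Dict Int Int), PySem.Dict.keys d = K → ks.Nodup →
      (∀ p ∈ ks, PySem.Dict.getD d p 0 = 1) → (∀ p ∈ ks, p ∈ K) →
      ks.foldl (aBump walls size) d =
        ks.foldl (bBump (PySem.Set.union (PySem.Set.ofList walls) K) size) d := by
  induction ks with
  | nil => intros; rfl
  | cons pos ks ih =>
    intro d hK hnd hval hsub
    have hposK : pos ∈ K := hsub pos (by simp)
    have hcontains : d.contains pos = true := by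
      rw [PySem.Dict.contains_iff_mem_keys, hK]; exact hposK
    have hocc : ∀ x : Int, (walls.contains x || d.contains x) =
        PySem.Set.contains (PySem.Set.union (PySem.Set.ofList walls) K) x := by
      intro x
      by_cases hx : x ∈ walls ∨ x ∈ K
      · have h1 : PySem.Set.contains (PySem.Set.union (PySem.Set.ofList walls) K) x = true := by
          rw [PySem.Set.contains_iff, PySem.Set.mem_union]
          rcases hx with hx | hx
          · exact Or.inl ((PySem.Set.mem_ofList walls x).mpr hx)
          · exact Or.inr hx
        rw [h1]
        rcases hx with hx | hx
        · simp [hx]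
        · have hdx : d.contains x = true := by
            rw [PySem.Dict.contains_iff_mem_keys, hK]; exact hx
          simp [hdx]
      · rw [not_or] at hx
        have h1 : PySem.Set.contains (PySem.Set.union (PySem.Set.ofList walls) K) x = false := by
          rw [Bool.eq_false_iff, Ne, PySem.Set.contains_iff, PySem.Set.mem_union]
          rintro (h | h)
          · exact hx.1 ((PySem.Set.mem_ofList walls x).mp h)
          · exact hx.2 h
        have h2 : d.contains x = false := by
          rw [Bool.eq_false_iff, Ne, PySem.Dict.contains_iff_mem_keys, hK]; exact hx.2
        have h3 : walls.contains x = false := by simp [hx.1]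
        rw [h1, h2, h3]
        rfl
    have hstep : aBump walls size d pos =
        bBump (PySem.Set.union (PySem.Set.ofList walls) K) size d pos := by
      have hX := hocc (pos + 1)
      have hY := hocc (pos - 1)
      have h2 : PySem.Dict.getD d pos 0 + 1 = 2 := by
        rw [hval pos (by simp)]
        norm_num
      simp only [aBump, bBump]
      rw [← hX, ← hY, h2, pv_cascade]
    simp only [List.foldl_cons]
    rw [hstep]
    set d' := bBump (PySem.Set.union (PySem.Set.ofList walls) K) size d pos with hd'
    have hK' : PySem.Dict.keys d' = K := by
      rw [hd']; simp only [bBump]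
      split
      · rw [PySem.Dict.keys_insert_of_contains d _ hcontains, hK]
      · exact hK
    have hval' : ∀ p ∈ ks, PySem.Dict.getD d' p 0 = 1 := by
      intro p hp
      have hne : p ≠ pos := by
        rintro rfl
        exact (List.nodup_cons.mp hnd).1 hp
      rw [hd']; simp only [bBump]
      split
      · rw [PySem.Dict.getD_insert_of_ne d _ _ hne]
        exact hval p (List.mem_cons_of_mem _ hp)
      · exact hval p (List.mem_cons_of_mem _ hp)
    exact ih d' hK' (List.nodup_cons.mp hnd).2 hval' (fun p hp => hsub p (List.mem_cons_of_mem _ hp))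

-- ===== VERDICT (by name: the statement is the Claim_ definition above) =====
theorem getWallsBeneathPositions_spec : Claim_equal_getWallsBeneathPositions := by
  intro walls size _ hpre
  unfold Pre_getWallsBeneathPositions at hpre
  unfold Spec_getWallsBeneathPositions
  simp only [getWallsBeneathPositions, getWallsBeneathPositions_alt]
  have hInv0 : pvInv walls size PySem.Dict.empty PySem.Dict.empty := by
    refine ⟨by simp [PySem.Dict.keys_empty], by simp [PySem.Dict.keys_empty], ?_, ?_, ?_⟩
    · intro c r hmem
      have he : (PySem.Dict.empty : PySem.Dict Int Int).items = [] := rfl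
      rw [he] at hmem
      simp at hmem
    · intro p
      rw [PySem.Dict.keys_empty, PySem.Dict.getD_empty]
      simp only [List.not_mem_nil, false_iff]
      rintro ⟨-, h1, h2⟩
      omega
    · intro p v hmem
      have he : (PySem.Dict.empty : PySem.Dict Int Int).items = [] := rfl
      rw [he] at hmem
      simp at hmem
  obtain ⟨heq, hInv⟩ := pv_firstPass walls size hpre walls PySem.Dict.empty PySem.Dict.empty hInv0
  rw [heq]
  set S := (walls.foldl (bWallStep (PySem.Set.ofList walls) size) (PySem.Dict.empty, PySem.Dict.empty)).2 with hS
  congr 1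
  have hndS : (PySem.Dict.keys S).Nodup := hInv.2.1
  have hvalS : ∀ p ∈ PySem.Dict.keys S, PySem.Dict.getD S p 0 = 1 := by
    intro p hp
    simp only [PySem.Dict.keys] at hp
    obtain ⟨q, hq, hfst⟩ := List.mem_map.mp hp
    have hmem : (p, q.2) ∈ S.items := by rw [← hfst]; simpa using hq
    have hv1 := hInv.2.2.2.2 p q.2 hmem
    rw [hv1] at hmem
    exact PySem.Dict.getD_of_mem_items S hmem hndS 0
  exact pv_secondPass walls size S.keys S.keys S rfl hndS hvalS (fun p hp => hp)
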